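-- pv_equiv track=rewrite | github.com/YorkBen/projects | NLP/MedicalRecord/FeatureExtraction/backup/process_inspect.py | trans_inspect_tomap
-- ===== SOURCE A (Python) =====
-- def trans_inspect_tomap(data_inspect):
--     result = {}
--     for ind, r1 in enumerate(data_inspect):
--         m_no = r1[0]
--         if m_no not in result:
--             result[m_no] = []
--         l = result[m_no]
--         l.append((r1[1], r1[2], r1[3]))
--         result[m_no] = l
--
--     # 对每个m_no排序
--     for m_no in result:
--         l = result[m_no]
--         result[m_no] = sorted(l, key=lambda x: x[0])
--
--     return result
-- ===== SOURCE B (Python) =====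
-- def trans_inspect_tomap(data_inspect):
--     # sort-then-group: stable sort by column 1, then one pass fills pre-seeded keys
--     result = {r[0]: [] for r in data_inspect}
--     for r in sorted(data_inspect, key=lambda r: r[1]):
--         result[r[0]].append((r[1], r[2], r[3]))
--     return result
-- ===== Notes on version B (the rewrite author's own statement) =====
-- stated objective: simpler
-- what changed: B replaces A's group-into-dict-then-sort-each-group with one stable sort of the whole list on column 1 followed by a single grouping pass over pre-seeded keys, so no per-group sorted() call is needed.
import Mathlib
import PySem

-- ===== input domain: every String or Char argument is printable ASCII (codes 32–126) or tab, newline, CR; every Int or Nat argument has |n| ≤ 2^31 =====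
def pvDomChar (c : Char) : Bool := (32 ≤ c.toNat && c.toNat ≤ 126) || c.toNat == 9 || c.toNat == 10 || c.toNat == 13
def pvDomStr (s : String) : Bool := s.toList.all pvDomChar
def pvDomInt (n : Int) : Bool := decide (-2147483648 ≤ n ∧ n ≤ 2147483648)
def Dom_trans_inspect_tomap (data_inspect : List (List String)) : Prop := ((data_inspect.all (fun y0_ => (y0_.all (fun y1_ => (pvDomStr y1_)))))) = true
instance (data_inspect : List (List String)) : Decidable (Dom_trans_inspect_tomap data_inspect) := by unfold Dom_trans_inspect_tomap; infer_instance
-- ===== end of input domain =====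

-- B replaces A's group-then-sort-each-group by a single stable sort on column 1 followed by
-- one grouping pass over the already-sorted rows (objective: simpler decomposition, same cost).

-- ===== PORT A =====
def trans_inspect_tomap (data_inspect : List (List String)) : List (String × List (String × String × String)) :=
  -- result = {}; for ind, r1 in enumerate(data_inspect): ...
  let result : PySem.Dict String (List (String × String × String)) :=
    (PySem.List.enumerate data_inspect).foldl (fun result p =>
      let r1 := p.2
      let m_no := PySem.List.pyGetD r1 0 ""
      let result := if result.contains m_no then result else result.insert m_no []
      let l := result.getD m_no []
      result.insert m_no (l ++ [(PySem.List.pyGetD r1 1 "", PySem.List.pyGetD r1 2 "", PySem.List.pyGetD r1 3 "")]))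
      PySem.Dict.empty
  -- for m_no in result: result[m_no] = sorted(result[m_no], key=lambda x: x[0])
  let result := result.keys.foldl (fun result m_no =>
      let l := result.getD m_no []
      result.insert m_no (PySem.List.sorted l (fun x => x.1) false)) result
  result.items

-- ===== PORT B =====
def trans_inspect_tomap_alt (data_inspect : List (List String)) : List (String × List (String × String × String)) :=
  -- result = {r[0]: [] for r in data_inspect}
  let result : PySem.Dict String (List (String × String × String)) :=
    data_inspect.foldl (fun d r => d.insert (PySem.List.pyGetD r 0 "") []) PySem.Dict.empty
  -- for r in sorted(data_inspect, key=lambda r: r[1]): result[r[0]].append((r[1], r[2], r[3]))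
  let result := (PySem.List.sorted data_inspect (fun r => PySem.List.pyGetD r 1 "") false).foldl
      (fun d r => d.modify (PySem.List.pyGetD r 0 "") []
        (· ++ [(PySem.List.pyGetD r 1 "", PySem.List.pyGetD r 2 "", PySem.List.pyGetD r 3 "")])) result
  result.items

-- ===== PRECONDITION & SPEC =====
-- Pre_ excludes exactly the inputs where Python A raises IndexError: a row with fewer than 4 entries.
def Pre_trans_inspect_tomap (data_inspect : List (List String)) : Prop :=
  ∀ r ∈ data_inspect, 4 ≤ r.length
instance (data_inspect : List (List String)) : Decidable (Pre_trans_inspect_tomap data_inspect) := by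
  unfold Pre_trans_inspect_tomap; infer_instance
def pvWitness_trans_inspect_tomap : List (List String) := [["a", "x", "u", "v"], ["a", "w", "s", "t"]]

def Spec_trans_inspect_tomap (data_inspect : List (List String)) (out : List (String × List (String × String × String))) : Prop := out = trans_inspect_tomap_alt data_inspect
instance (data_inspect : List (List String)) (out : List (String × List (String × String × String))) : Decidable (Spec_trans_inspect_tomap data_inspect out) := by unfold Spec_trans_inspect_tomap; infer_instance

-- ===== CLAIM (what is proved, stated in full; the proofs are below) =====
def Claim_equal_trans_inspect_tomap : Prop := ∀ (data_inspect : List (List String)), Dom_trans_inspect_tomap data_inspect → Pre_trans_inspect_tomap data_inspect → Spec_trans_inspect_tomap data_inspect (trans_inspect_tomap data_inspect)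

-- ===== LEMMAS AND PROOFS =====

-- abbreviations for the three column projections and the loop bodies of both ports
def pvK0 (r : List String) : String := PySem.List.pyGetD r 0 ""
def pvK1 (r : List String) : String := PySem.List.pyGetD r 1 ""
def pvPj (r : List String) : String × String × String :=
  (PySem.List.pyGetD r 1 "", PySem.List.pyGetD r 2 "", PySem.List.pyGetD r 3 "")

-- the body of A's first loop, exactly as ported
def pvStepA (d : PySem.Dict String (List (String × String × String))) (r1 : List String) :
    PySem.Dict String (List (String × String × String)) :=
  let m_no := PySem.List.pyGetD r1 0 ""
  let d1 := if d.contains m_no then d else d.insert m_no []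
  let l := d1.getD m_no []
  d1.insert m_no (l ++ [(PySem.List.pyGetD r1 1 "", PySem.List.pyGetD r1 2 "", PySem.List.pyGetD r1 3 "")])

-- the grouping step (= body of B's second loop, exactly as ported)
def pvStepG (d : PySem.Dict String (List (String × String × String))) (r : List String) :
    PySem.Dict String (List (String × String × String)) :=
  d.modify (pvK0 r) [] (· ++ [pvPj r])

-- the body of A's second loop
def pvLoop2 (d : PySem.Dict String (List (String × String × String))) (k : String) :
    PySem.Dict String (List (String × String × String)) :=
  d.insert k (PySem.List.sorted (d.getD k []) (fun x => x.1) false)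

-- the body of B's dict comprehension
def pvStepB0 (d : PySem.Dict String (List (String × String × String))) (r : List String) :
    PySem.Dict String (List (String × String × String)) :=
  d.insert (pvK0 r) []

-- folding over enumerate while ignoring the index is folding over the list
theorem pv_foldl_enumerate {α β : Type} (g : β → α → β) :
    ∀ (xs : List α) (s : Int) (a : β),
      (PySem.List.enumerate xs s).foldl (fun d p => g d p.2) a = xs.foldl g a := by
  intro xs
  induction xs with
  | nil => intro s a; rfl
  | cons x xs ih =>
      intro s a
      rw [PySem.List.enumerate_cons]
      simp only [List.foldl_cons]
      exact ih (s + 1) (g a x)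

-- A's first-loop body is a modify
theorem pv_A_step_eq (d : PySem.Dict String (List (String × String × String))) (r : List String) :
    pvStepA d r = pvStepG d r := by
  unfold pvStepA pvStepG
  by_cases h : d.contains (PySem.List.pyGetD r 0 "") = true
  · simp only [h, if_true, PySem.Dict.modify, pvK0, pvPj]
  · have h' : d.contains (PySem.List.pyGetD r 0 "") = false := by
      simpa using h
    simp only [h', Bool.false_eq_true, if_false, PySem.Dict.modify, pvK0, pvPj,
      PySem.Dict.getD_insert_self, PySem.Dict.insert_insert_self, List.nil_append]
    rw [PySem.Dict.getD_of_not_contains (h := h')]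
    simp

-- a fold that only ever inserts [] leaves every getD-with-[] at []
theorem pv_getD_seed (l : List (List String))
    (d : PySem.Dict String (List (String × String × String)))
    (h : ∀ c, d.getD c [] = []) (c : String) :
    (l.foldl pvStepB0 d).getD c [] = [] := by
  induction l generalizing d with
  | nil => exact h c
  | cons r l ih =>
      simp only [List.foldl_cons]
      refine ih _ (fun c' => ?_)
      rw [pvStepB0, PySem.Dict.getD_insert]
      split_ifs with hc
      · rfl
      · exact h c'

-- second loop of A: each key is read before it is written, keys distinct
theorem pv_loop2_getD (ks : List String)
    (d : PySem.Dict String (List (String × String × String))) (hnd : ks.Nodup) (c : String) :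
    (ks.foldl pvLoop2 d).getD c []
      = if c ∈ ks then PySem.List.sorted (d.getD c []) (fun x => x.1) false else d.getD c [] := by
  induction ks generalizing d with
  | nil => simp
  | cons k ks ih =>
      simp only [List.foldl_cons]
      have hk : k ∉ ks := (List.nodup_cons.mp hnd).1
      rw [ih _ (List.nodup_cons.mp hnd).2]
      by_cases hck : c = k
      · subst hck
        simp [hk, pvLoop2, PySem.Dict.getD_insert_self]
      · rw [pvLoop2, PySem.Dict.getD_insert _ _ _ _ _ , if_neg hck]
        simp [List.mem_cons, hck]

theorem pv_set_update_self {α : Type} [BEq α] [LawfulBEq α] (s : PySem.Set α) (l : List α)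
    (h : ∀ x ∈ l, x ∈ s) : PySem.Set.update s l = s := by
  rw [PySem.Set.update_eq_append_filter]
  have : List.filter (fun y => !s.contains y) (PySem.Set.ofList l) = [] := by
    rw [List.filter_eq_nil_iff]
    intro a ha
    simpa using h a ((PySem.Set.mem_ofList l a).mp ha)
  rw [this, List.append_nil]

-- insertBy facts
theorem pv_insertBy_cons {α : Type} (bf : α → α → Bool) (x : α) (zs : List α)
    (h : ∀ z ∈ zs, bf x z = true) : PySem.List.insertBy bf x zs = x :: zs := by
  cases zs with
  | nil => rfl
  | cons z zs => simp [PySem.List.insertBy, h z (List.mem_cons_self ..)]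

theorem pv_pairwise_insertBy {α κ : Type} [LinearOrder κ] (key : α → κ) (x : α) (ys : List α)
    (h : ys.Pairwise (fun a b => key a ≤ key b)) :
    (PySem.List.insertBy (fun a b => decide (key a < key b)) x ys).Pairwise (fun a b => key a ≤ key b) := by
  induction ys with
  | nil => simp [PySem.List.insertBy]
  | cons y ys ih =>
      by_cases hxy : key x < key y
      · rw [pv_insertBy_cons _ _ _ (fun z hz => ?_)]
        · refine List.pairwise_cons.mpr ⟨fun z hz => ?_, h⟩
          rcases List.mem_cons.mp hz with rfl | hz
          · exact le_of_lt hxy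
          · exact le_trans (le_of_lt hxy) ((List.pairwise_cons.mp h).1 z hz)
        · rcases List.mem_cons.mp hz with rfl | hz
          · simpa using hxy
          · exact decide_eq_true (lt_of_lt_of_le hxy ((List.pairwise_cons.mp h).1 z hz))
      · simp only [PySem.List.insertBy, decide_eq_true_eq, hxy, if_false]
        refine List.pairwise_cons.mpr ⟨fun z hz => ?_, ih (List.pairwise_cons.mp h).2⟩
        rcases (PySem.List.mem_insertBy _ x z ys).mp hz with rfl | hz
        · exact le_of_not_gt hxy
        · exact (List.pairwise_cons.mp h).1 z hz

theorem pv_filter_insertBy {α κ : Type} [LinearOrder κ] (key : α → κ) (p : α → Bool) (x : α)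
    (ys : List α) (h : ys.Pairwise (fun a b => key a ≤ key b)) :
    (PySem.List.insertBy (fun a b => decide (key a < key b)) x ys).filter p
      = if p x then PySem.List.insertBy (fun a b => decide (key a < key b)) x (ys.filter p)
        else ys.filter p := by
  induction ys with
  | nil =>
      cases hpx : p x <;> simp [PySem.List.insertBy, hpx]
  | cons y ys ih =>
      have hys := (List.pairwise_cons.mp h).2
      have hy := (List.pairwise_cons.mp h).1
      by_cases hxy : key x < key y
      · -- x goes to the head
        have hhead : ∀ z ∈ (y :: ys).filter p, decide (key x < key z) = true := by
          intro z hz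
          have hzmem : z ∈ y :: ys := List.mem_of_mem_filter hz
          rcases List.mem_cons.mp hzmem with rfl | hz'
          · simpa using hxy
          · exact decide_eq_true (lt_of_lt_of_le hxy (hy z hz'))
        rw [show PySem.List.insertBy (fun a b => decide (key a < key b)) x (y :: ys)
              = x :: y :: ys by simp [PySem.List.insertBy, hxy]]
        cases hpx : p x
        · simp [List.filter_cons, hpx]
        · rw [pv_insertBy_cons _ _ _ hhead]
          simp [List.filter_cons, hpx]
      · rw [show PySem.List.insertBy (fun a b => decide (key a < key b)) x (y :: ys)
              = y :: PySem.List.insertBy (fun a b => decide (key a < key b)) x ys by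
            simp [PySem.List.insertBy, hxy]]
        cases hpy : p y
        · simp only [List.filter_cons, hpy, Bool.false_eq_true, if_false]
          exact ih hys
        · simp only [List.filter_cons, hpy, if_true]
          rw [ih hys]
          cases hpx : p x
          · simp
          · simp only [if_true]
            rw [show PySem.List.insertBy (fun a b => decide (key a < key b)) x (y :: ys.filter p)
                  = y :: PySem.List.insertBy (fun a b => decide (key a < key b)) x (ys.filter p) by
                simp [PySem.List.insertBy, hxy]]

-- a stable sort commutes with filter
theorem pv_filter_sorted {α κ : Type} [LinearOrder κ] (key : α → κ) (p : α → Bool) (l : List α) :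
    (PySem.List.sorted l key false).filter p = PySem.List.sorted (l.filter p) key false := by
  rw [PySem.List.sorted_eq_foldl_insertBy, PySem.List.sorted_eq_foldl_insertBy]
  have main : ∀ (l : List α) (acc : List α), acc.Pairwise (fun a b => key a ≤ key b) →
      (l.foldl (fun acc x => PySem.List.insertBy (fun a b => decide (key a < key b)) x acc) acc).filter p
        = (l.filter p).foldl (fun acc x => PySem.List.insertBy (fun a b => decide (key a < key b)) x acc) (acc.filter p) := by
    intro l
    induction l with
    | nil => intro acc _; rfl
    | cons x l ih =>
        intro acc hacc
        simp only [List.foldl_cons, List.filter_cons]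
        rw [ih _ (pv_pairwise_insertBy key x acc hacc)]
        rw [pv_filter_insertBy key p x acc hacc]
        cases hpx : p x
        · simp
        · simp
  simpa using main l [] List.Pairwise.nil

theorem pv_insertBy_map {α β : Type} (f : α → β) (bf : α → α → Bool) (bf' : β → β → Bool)
    (h : ∀ a b, bf' (f a) (f b) = bf a b) (ys : List α) (x : α) :
    PySem.List.insertBy bf' (f x) (ys.map f) = (PySem.List.insertBy bf x ys).map f := by
  induction ys with
  | nil => rfl
  | cons y ys ih =>
      simp only [List.map_cons, PySem.List.insertBy, h x y]
      cases hb : bf x y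
      · simp [ih]
      · simp

-- sorting the projected triples by first component = projecting the rows sorted by column 1
theorem pv_sorted_map_fst (l : List (List String)) :
    PySem.List.sorted (l.map pvPj) (fun x => x.1) false
      = (PySem.List.sorted l pvK1 false).map pvPj := by
  rw [PySem.List.sorted_eq_foldl_insertBy, PySem.List.sorted_eq_foldl_insertBy]
  have main : ∀ (l : List (List String)) (acc : List (List String)),
      ((l.map pvPj).foldl (fun acc x => PySem.List.insertBy (fun a b => decide (a.1 < b.1)) x acc) (acc.map pvPj))
        = (l.foldl (fun acc x => PySem.List.insertBy (fun a b => decide (pvK1 a < pvK1 b)) x acc) acc).map pvPj := by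
    intro l
    induction l with
    | nil => intro acc; rfl
    | cons x l ih =>
        intro acc
        simp only [List.map_cons, List.foldl_cons]
        rw [pv_insertBy_map pvPj (fun a b => decide (pvK1 a < pvK1 b)) (fun a b => decide (a.1 < b.1))
          (fun a b => rfl) acc x]
        exact ih _
  simpa using main l []

-- the grouped-by-key value of the grouping fold
theorem pv_group_getD (l : List (List String))
    (d : PySem.Dict String (List (String × String × String))) (c : String) :
    (l.foldl pvStepG d).getD c []
      = d.getD c [] ++ (l.filter (fun r => pvK0 r == c)).map pvPj := by
  have hfold : l.foldl pvStepG d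
      = ((l.map (fun r => (pvK0 r, pvPj r))).foldl (fun d p => d.modify p.1 [] (· ++ [p.2])) d) := by
    rw [List.foldl_map]; rfl
  rw [hfold, PySem.Dict.getD_foldl_modify_append]
  simp [List.filter_map, Function.comp_def]

-- ===== VERDICT (by name: the statement is the Claim_ definition above) =====
theorem trans_inspect_tomap_spec : Claim_equal_trans_inspect_tomap := by
  intro data _hdom _hpre
  unfold Spec_trans_inspect_tomap
  have hK0nodup : (PySem.Set.ofList (data.map pvK0)).Nodup := PySem.Set.nodup_ofList _
  have hGlam : pvStepG = (fun (d : PySem.Dict String (List (String × String × String)))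
      (x : List String) => d.modify (pvK0 x) [] (· ++ [pvPj x])) := rfl
  have hLlam : pvLoop2 = (fun (d : PySem.Dict String (List (String × String × String)))
      (k : String) => d.insert k (PySem.List.sorted (d.getD k []) (fun x => x.1) false)) := rfl
  have hB0lam : pvStepB0 = (fun (d : PySem.Dict String (List (String × String × String)))
      (x : List String) => d.insert (pvK0 x) []) := rfl
  -- ===== A side =====
  have hA0 : trans_inspect_tomap data
      = (((PySem.List.enumerate data 0).foldl (fun d p => pvStepA d p.2) PySem.Dict.empty).keys.foldl
          pvLoop2
          ((PySem.List.enumerate data 0).foldl (fun d p => pvStepA d p.2) PySem.Dict.empty)).items := rfl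
  have e1 : (PySem.List.enumerate data 0).foldl (fun d p => pvStepA d p.2) PySem.Dict.empty
      = data.foldl pvStepG PySem.Dict.empty := by
    rw [show (fun (d : PySem.Dict String (List (String × String × String))) (p : Int × List String) =>
          pvStepA d p.2) = (fun d p => pvStepG d p.2) from
        funext fun d => funext fun p => pv_A_step_eq d p.2]
    exact pv_foldl_enumerate pvStepG data 0 _
  have hGkeys : (data.foldl pvStepG PySem.Dict.empty).keys = PySem.Set.ofList (data.map pvK0) := by
    rw [hGlam, PySem.Dict.keys_foldl_modify_key, PySem.Dict.keys_empty, PySem.Set.update_nil_left]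
  have hGnodup : (data.foldl pvStepG PySem.Dict.empty).keys.Nodup := by
    rw [hGkeys]; exact hK0nodup
  have hA2keys : (((data.foldl pvStepG PySem.Dict.empty).keys.foldl pvLoop2
        (data.foldl pvStepG PySem.Dict.empty)).keys) = (data.foldl pvStepG PySem.Dict.empty).keys := by
    rw [hLlam, PySem.Dict.keys_foldl_insert]
    exact pv_set_update_self _ _ (fun x hx => hx)
  have hA2nodup : (((data.foldl pvStepG PySem.Dict.empty).keys.foldl pvLoop2
        (data.foldl pvStepG PySem.Dict.empty)).keys).Nodup := by
    rw [hA2keys]; exact hGnodup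
  have hA : trans_inspect_tomap data
      = (PySem.Set.ofList (data.map pvK0)).map (fun k =>
          (k, PySem.List.sorted ((data.filter (fun r => pvK0 r == k)).map pvPj) (fun x => x.1) false)) := by
    rw [hA0, e1]
    rw [PySem.Dict.items_eq_map_keys _ hA2nodup []]
    rw [hA2keys, hGkeys]
    refine List.map_congr_left (fun k hk => ?_)
    rw [pv_loop2_getD _ _ hK0nodup k, if_pos hk, pv_group_getD data PySem.Dict.empty k,
      PySem.Dict.getD_empty, List.nil_append]
  -- ===== B side =====
  have hB0 : trans_inspect_tomap_alt data
      = ((PySem.List.sorted data pvK1 false).foldl pvStepG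
          (data.foldl pvStepB0 PySem.Dict.empty)).items := rfl
  have hB0keys : (data.foldl pvStepB0 PySem.Dict.empty).keys = PySem.Set.ofList (data.map pvK0) := by
    rw [hB0lam, PySem.Dict.keys_foldl_insert_key data pvK0, PySem.Dict.keys_empty,
      PySem.Set.update_nil_left]
  have hBDkeys : ((PySem.List.sorted data pvK1 false).foldl pvStepG
        (data.foldl pvStepB0 PySem.Dict.empty)).keys = PySem.Set.ofList (data.map pvK0) := by
    rw [hGlam, PySem.Dict.keys_foldl_modify_key, hB0keys]
    refine pv_set_update_self _ _ (fun x hx => ?_)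
    rcases List.mem_map.mp hx with ⟨r, hr, rfl⟩
    exact (PySem.Set.mem_ofList _ _).mpr
      (List.mem_map.mpr ⟨r, (PySem.List.mem_sorted data pvK1 false r).mp hr, rfl⟩)
  have hBDnodup : ((PySem.List.sorted data pvK1 false).foldl pvStepG
        (data.foldl pvStepB0 PySem.Dict.empty)).keys.Nodup := by
    rw [hBDkeys]; exact hK0nodup
  have hB : trans_inspect_tomap_alt data
      = (PySem.Set.ofList (data.map pvK0)).map (fun k =>
          (k, ((PySem.List.sorted data pvK1 false).filter (fun r => pvK0 r == k)).map pvPj)) := by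
    rw [hB0]
    rw [PySem.Dict.items_eq_map_keys _ hBDnodup []]
    rw [hBDkeys]
    refine List.map_congr_left (fun k hk => ?_)
    rw [pv_group_getD _ _ k, pv_getD_seed data PySem.Dict.empty (fun c => PySem.Dict.getD_empty ..) k,
      List.nil_append]
  -- ===== combine =====
  rw [hA, hB]
  refine List.map_congr_left (fun k _ => ?_)
  rw [pv_filter_sorted pvK1 (fun r => pvK0 r == k) data, pv_sorted_map_fst (data.filter (fun r => pvK0 r == k))]
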